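-- pv_equiv track=rewrite | github.com/thieleone/hello-world | python/ausdruecke.py | tokenize
-- ===== SOURCE A (Python) =====
-- ziffern = "0123456789"
--
-- def tokenize (s):
--     'wandelt Text s in eine Folge von "Tokens" um.'
--     # Variable 'Teil' wird initialisiert
--     Teil = ""
--     # Ergebnisliste wird initialisiert
--     erg = []
--     # c: character, s: Eingabestring
--     for c in s: # alle Zeichen des Eingabestrings durchlaufen
--         if c in ziffern: # Ist das aktuelle Zeichen eine Ziffer? Falls ja:
--             Teil += c # Ziffer an den aktuellen Teil anhängen
--         else: # Falls nicht:
--             if Teil: # Wenn die Variable nicht leer ist …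
--                 erg.append(Teil)    # den Inhalt der Variable Teil an die Ergebnisliste
--                                     # anhängen
--                 Teil = "" # Teil zurücksetzen
--             erg.append(c)   # Weil c keine Ziffer ist, wird sie als vollständiger Token
--                             # gewertet.
--     if Teil: # Wenn die Variable nicht leer ist …
--         erg.append(Teil) # den Inhalt der Variable Teil an die Ergebnisliste anhängen
--     return erg # die Ergebnisliste zurückgeben
-- ===== SOURCE B (Python) =====
-- import re
--
-- def tokenize(s):
--     'wandelt Text s in eine Folge von "Tokens" um.'
--     return re.findall(r'[0-9]+|[^0-9]', s)
-- ===== Notes on version B (the rewrite author's own statement) =====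
-- stated objective: idiomatic
-- what changed: Replaces the manual character loop with accumulator state (Teil, erg) by a single regex scan re.findall(r'[0-9]+|[^0-9]', s), letting the regex engine emit maximal digit runs and single non-digit characters directly.
import Mathlib
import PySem

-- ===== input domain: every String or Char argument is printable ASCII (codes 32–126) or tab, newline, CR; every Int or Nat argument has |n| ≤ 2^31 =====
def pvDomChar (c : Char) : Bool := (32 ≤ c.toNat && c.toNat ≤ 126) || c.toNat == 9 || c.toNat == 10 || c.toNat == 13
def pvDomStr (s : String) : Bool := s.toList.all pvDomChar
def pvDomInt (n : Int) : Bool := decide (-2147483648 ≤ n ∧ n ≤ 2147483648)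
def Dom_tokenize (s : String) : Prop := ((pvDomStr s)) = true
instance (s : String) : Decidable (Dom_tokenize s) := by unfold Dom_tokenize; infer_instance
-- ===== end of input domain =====

-- B replaces A's manual accumulator loop by a single regex scan re.findall(r'[0-9]+|[^0-9]', s) (idiomatic).

-- ===== PORT A =====
def ziffern : String := "0123456789"

-- A's for-loop over the characters of s with state (Teil, erg), then the final flush of Teil.
def tokenizeLoop (cs : List Char) (Teil : String) (erg : List String) : List String :=
  match cs with
  | [] => if Teil ≠ "" then erg ++ [Teil] else erg
  | c :: rest =>
      if ziffern.toList.contains c then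
        tokenizeLoop rest (Teil.push c) erg
      else if Teil ≠ "" then
        tokenizeLoop rest "" (erg ++ [Teil, String.ofList [c]])
      else
        tokenizeLoop rest "" (erg ++ [String.ofList [c]])

def tokenize (s : String) : List String := tokenizeLoop s.toList "" []

-- ===== PORT B =====
-- Hand port of Source B's regex scan: re.findall(r'[0-9]+|[^0-9]', s) matches, at each
-- position, a maximal run of [0-9] or else a single [^0-9] character; this recursion
-- is exact for that pattern.
def isDig (c : Char) : Bool := '0' ≤ c && c ≤ '9'

def tokenize_altGo : List Char → List String
  | [] => []
  | c :: rest =>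
      if isDig c then
        String.ofList ((c :: rest).takeWhile isDig) :: tokenize_altGo ((c :: rest).dropWhile isDig)
      else
        String.ofList [c] :: tokenize_altGo rest
termination_by cs => cs.length
decreasing_by
  · simp only [List.dropWhile_cons, *]
    exact Nat.lt_succ_of_le (List.length_dropWhile_le _ _)
  · simp

def tokenize_alt (s : String) : List String := tokenize_altGo s.toList

-- ===== PRECONDITION & SPEC =====
def Spec_tokenize (s : String) (out : List String) : Prop := out = tokenize_alt s
instance (s : String) (out : List String) : Decidable (Spec_tokenize s out) := by unfold Spec_tokenize; infer_instance

-- ===== CLAIM (what is proved, stated in full; the proofs are below) =====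
def Claim_equal_tokenize : Prop := ∀ (s : String), Dom_tokenize s → Spec_tokenize s (tokenize s)

-- ===== LEMMAS AND PROOFS =====

-- A's digit test (membership in "0123456789") agrees with B's range test [0-9].
theorem mem_ziffern (c : Char) : ziffern.toList.contains c = isDig c := by
  have h : ziffern.toList = ['0','1','2','3','4','5','6','7','8','9'] := rfl
  rw [h, Bool.eq_iff_iff, isDig]
  simp only [List.contains_cons, List.contains_nil, Bool.or_eq_true, beq_iff_eq, Bool.and_eq_true,
    decide_eq_true_eq, Char.ext_iff, Char.le_def, UInt32.le_iff_toNat_le, ← UInt32.toNat_inj]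
  simp only [show ('0':Char).val.toNat = 48 from rfl, show ('1':Char).val.toNat = 49 from rfl,
    show ('2':Char).val.toNat = 50 from rfl, show ('3':Char).val.toNat = 51 from rfl,
    show ('4':Char).val.toNat = 52 from rfl, show ('5':Char).val.toNat = 53 from rfl,
    show ('6':Char).val.toNat = 54 from rfl, show ('7':Char).val.toNat = 55 from rfl,
    show ('8':Char).val.toNat = 56 from rfl, show ('9':Char).val.toNat = 57 from rfl,
    Bool.false_eq_true, or_false]
  omega

theorem push_ofList (t : List Char) (c : Char) :
    (String.ofList t).push c = String.ofList (t ++ [c]) := by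
  apply String.toList_injective; simp

-- the result list accumulated in erg just prefixes the rest of the run
theorem loop_acc (cs : List Char) (t : String) (erg : List String) :
    tokenizeLoop cs t erg = erg ++ tokenizeLoop cs t [] := by
  induction cs generalizing t erg with
  | nil => simp only [tokenizeLoop]; split <;> simp
  | cons c rest ih =>
      simp only [tokenizeLoop]
      split
      · exact ih _ _
      · split
        · rw [ih _ (erg ++ _), ih _ ([] ++ _)]; simp
        · rw [ih _ (erg ++ _), ih _ ([] ++ _)]; simp

-- invariant: A's loop with a pending digit run t produces the maximal-run token first
theorem loop_eq (cs : List Char) (t : List Char) :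
    tokenizeLoop cs (String.ofList t) [] =
      (if t = [] then tokenize_altGo cs
       else String.ofList (t ++ cs.takeWhile isDig) :: tokenize_altGo (cs.dropWhile isDig)) := by
  induction cs generalizing t with
  | nil =>
      by_cases ht : t = [] <;>
        simp [tokenizeLoop, tokenize_altGo, ht]
  | cons c rest ih =>
      simp only [tokenizeLoop, mem_ziffern]
      by_cases hd : isDig c = true
      · rw [if_pos hd, push_ofList, ih (t ++ [c])]
        by_cases ht : t = [] <;>
          simp [ht, tokenize_altGo, hd]
      · rw [if_neg hd]
        by_cases ht : t = []
        · subst ht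
          simp only [String.ofList_nil]
          rw [if_neg (by simp), loop_acc, ih []]
          simp [tokenize_altGo, hd]
        · rw [if_pos (by simp [ht]), loop_acc, ih []]
          simp [ht, tokenize_altGo, hd]

-- ===== VERDICT (by name: the statement is the Claim_ definition above) =====
theorem tokenize_spec : Claim_equal_tokenize := by
  intro s _
  show tokenize s = tokenize_alt s
  have h := loop_eq s.toList []
  simpa [tokenize, tokenize_alt] using h
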